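-- pv_equiv track=rewrite | github.com/Vergil0327/leetcode-history | Segment Tree/3525. Find X Value of Array II/solution.py | resultArray
-- ===== SOURCE A (Python) =====
-- from typing import List
--
-- class SegTree:
--     def __init__(self, nums: List[int], k: int):
--         self.k = k
--         n = len(nums)
--         size = 1
--         while size < n:
--             size <<= 1
--         self.size = size
--
--         self.tree = [([0]*k, 1) for _ in range(2 * size)]
--         for i in range(n):
--             r = nums[i] % k
--             cnt = [0]*k
--             cnt[r] = 1
--             self.tree[size + i] = (cnt, r)
--
--         for p in range(size - 1, 0, -1):
--             self.tree[p] = self.merge(self.tree[p<<1], self.tree[p<<1|1])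
--
--     def merge(self, l, r):
--         cnt_l, prod_l = l
--         cnt_r, prod_r = r
--         k = self.k
--
--         count = cnt_l.copy()
--         for r in range(k): # append suffix (segment `r`) to each prefix of `l`
--             if cnt_r[r]:
--                 x = (prod_l * r) % k
--                 count[x] += cnt_r[r]
--
--         prod = (prod_l * prod_r) % k
--         return count, prod
--
--     def update(self, idx, val):
--         pos = self.size + idx
--
--         r = val % self.k
--         cnt = [0] * self.k
--         cnt[r] = 1
--         self.tree[pos] = (cnt, r)
--
--         # keep update from leaf to the root
--         pos >>= 1
--         while pos:
--             self.tree[pos] = self.merge(self.tree[2 * pos], self.tree[2 * pos + 1])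
--             pos >>= 1
--
--     # query [l,r) right-exclusive
--     def query(self, l, r):
--         l += self.size
--         r += self.size
--         cnt_l, prod_l = [0]*self.k, 1
--         cnt_r, prod_r = [0]*self.k, 1
--         while l < r:
--             if l & 1:
--                 cnt_l, prod_l = self.merge((cnt_l, prod_l), self.tree[l])
--                 l += 1
--             if r & 1:
--                 r -= 1
--                 cnt_r, prod_r = self.merge(self.tree[r], (cnt_r, prod_r))
--             l, r = l>>1, r>>1
--
--         return self.merge((cnt_l, prod_l), (cnt_r, prod_r))
--
--     # query [l,r] both-exclusive
--     def query2(self, l, r):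
--         l += self.size
--         r += self.size
--         cnt_l, prod_l = [0]*self.k, 1
--         cnt_r, prod_r = [0]*self.k, 1
--         while l <= r:
--             if l == r:
--                 cnt_l, prod_l = self.merge((cnt_l, prod_l), self.tree[l])
--                 break
--
--             if l & 1:
--                 cnt_l, prod_l = self.merge((cnt_l, prod_l), self.tree[l])
--                 l += 1
--             if r & 1 == 0:
--                 cnt_r, prod_r = self.merge(self.tree[r], (cnt_r, prod_r))
--                 r -= 1
--             l, r = l>>1, r>>1
--
--         return self.merge((cnt_l, prod_l), (cnt_r, prod_r))
--
-- def resultArray(nums: List[int], k: int, queries: List[List[int]]) -> List[int]: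
--     st = SegTree(nums, k)
--
--     res = []
--     for idx, val, start, x in queries:
--         st.update(idx, val)
--         # cnt, _ = st.query(start, len(nums))
--         cnt, _ = st.query2(start, len(nums)-1)
--         res.append(cnt[x])
--     return res
-- ===== SOURCE B (Python) =====
-- from typing import List
--
-- def resultArray(nums: List[int], k: int, queries: List[List[int]]) -> List[int]:
--     n = len(nums)
--     arr = list(nums)
--     res = []
--     for idx, val, start, x in queries:
--         arr[idx] = val
--         running = 1
--         cnt = 0
--         for j in range(start, n):
--             running = (running * arr[j]) % k
--             if running == x:
--                 cnt += 1
--         res.append(cnt)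
--     return res
-- ===== Notes on version B (the rewrite author's own statement) =====
-- stated objective: simpler
-- what changed: Replaces the segment tree of (count-vector, product) nodes with its log-depth merge aggregation by a mutable copy of nums and a direct per-query suffix scan keeping a running modular product and a match counter.
-- outside the precondition, e.g. on resultArray([2, 3, 4], 2, [[3, 5, 0, 0]]): A returns [3], B raises IndexError; on resultArray([6], 5, [[-1, 8, 0, 1]]): A returns [1], B returns [0]; on resultArray([9, 4], 1, [[1, 7, -2, 0]]): A returns [0], B returns [4]
import Mathlib
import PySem

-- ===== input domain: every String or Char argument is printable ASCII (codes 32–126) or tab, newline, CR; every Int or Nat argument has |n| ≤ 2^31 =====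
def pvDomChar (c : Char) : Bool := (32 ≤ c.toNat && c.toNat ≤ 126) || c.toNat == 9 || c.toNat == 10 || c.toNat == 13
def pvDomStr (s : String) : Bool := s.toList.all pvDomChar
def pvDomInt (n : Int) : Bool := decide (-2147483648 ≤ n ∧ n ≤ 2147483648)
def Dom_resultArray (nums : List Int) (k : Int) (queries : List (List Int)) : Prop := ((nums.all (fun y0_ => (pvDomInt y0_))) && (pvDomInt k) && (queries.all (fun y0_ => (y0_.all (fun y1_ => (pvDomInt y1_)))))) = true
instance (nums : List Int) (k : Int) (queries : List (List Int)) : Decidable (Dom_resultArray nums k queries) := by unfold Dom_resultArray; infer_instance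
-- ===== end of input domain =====

-- B replaces A's segment tree by a per-query suffix scan over a mutable copy of nums (objective: simpler).
-- Neither program mutates its arguments; equivalence is about the return value.

-- ===== PORT A =====
-- A segment-tree node is (count vector of length k, segment product mod k).
abbrev pvM : Type := List Int × Int

def pvMod (a b : Int) : Int := PySem.Int.mod a b

-- `while size < n: size <<= 1` (fuel `n` is a totality guard only; it never binds: size doubles each step)
def pvSizeGo : Nat → Nat → Nat → Nat
  | 0, _, size => size
  | f+1, n, size => if size < n then pvSizeGo f n (size * 2) else size

def pvSize (n : Nat) : Nat := pvSizeGo n n 1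

-- identity-shaped node `([0]*k, 1)`
def pvE (k : Int) : pvM := (List.replicate k.toNat 0, 1)

-- `cnt = [0]*k; cnt[r] = 1` with `r = v % k`
def pvLeaf (k v : Int) : pvM := ((List.replicate k.toNat 0).set (pvMod v k).toNat 1, pvMod v k)

-- SegTree.merge
def pvMerge (k : Int) (a b : pvM) : pvM :=
  let count := (List.range k.toNat).foldl (fun c r =>
      if b.1.getD r 0 ≠ 0 then
        c.set (pvMod (a.2 * (r : Int)) k).toNat
          (c.getD (pvMod (a.2 * (r : Int)) k).toNat 0 + b.1.getD r 0)
      else c) a.1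
  (count, pvMod (a.2 * b.2) k)

-- tree cell read `self.tree[p]`
def pvT (k : Int) (tree : List pvM) (p : Nat) : pvM := tree.getD p (pvE k)

-- `for p in range(size-1, 0, -1): tree[p] = merge(tree[2p], tree[2p+1])`
def pvBuildUp (k : Int) : Nat → List pvM → List pvM
  | 0, tree => tree
  | p+1, tree => pvBuildUp k p (tree.set (p+1) (pvMerge k (pvT k tree (2*(p+1))) (pvT k tree (2*(p+1)+1))))

-- update's `while pos:` loop (entered with pos already halved once; the fuel argument is a
-- totality guard only — pos halves each step, so fuel > pos never runs out)
def pvUpdLoop (k : Int) : Nat → List pvM → Nat → List pvM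
  | 0, tree, _ => tree
  | f+1, tree, pos =>
    if pos = 0 then tree
    else pvUpdLoop k f (tree.set pos (pvMerge k (pvT k tree (2*pos)) (pvT k tree (2*pos+1)))) (pos / 2)

def pvUpdate (k : Int) (size : Nat) (tree : List pvM) (idx val : Int) : List pvM :=
  let pos := size + idx.toNat
  pvUpdLoop k (pos + 1) (tree.set pos (pvLeaf k val)) (pos / 2)

-- SegTree.query2 (inclusive bounds), iterative bottom-up loop (fuel is a totality guard only:
-- r strictly decreases each iteration, so fuel = r+1 never runs out)
def pvQ2 (k : Int) (tree : List pvM) : Nat → Nat → Nat → pvM → pvM → pvM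
  | 0, _, _, accL, accR => pvMerge k accL accR
  | f+1, l, r, accL, accR =>
    if l ≤ r then
      if l = r then pvMerge k (pvMerge k accL (pvT k tree l)) accR
      else
        let aL := if l % 2 = 1 then pvMerge k accL (pvT k tree l) else accL
        let l1 := if l % 2 = 1 then l + 1 else l
        let aR := if r % 2 = 0 then pvMerge k (pvT k tree r) accR else accR
        let r1 := if r % 2 = 0 then r - 1 else r
        pvQ2 k tree f (l1 / 2) (r1 / 2) aL aR
    else pvMerge k accL accR

def resultArray (nums : List Int) (k : Int) (queries : List (List Int)) : List Int :=
  let n := nums.length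
  let size := pvSize n
  let tree0 := (List.range n).foldl
      (fun t i => t.set (size + i) (pvLeaf k (nums.getD i 0)))
      (List.replicate (2 * size) (pvE k))
  let tree1 := pvBuildUp k (size - 1) tree0
  (queries.foldl (fun (st : List pvM × List Int) q =>
      let idx := q.getD 0 0
      let val := q.getD 1 0
      let start := q.getD 2 0
      let x := q.getD 3 0
      let t := pvUpdate k size st.1 idx val
      let ans := pvQ2 k t (size + n) (size + start.toNat) (size + n - 1) (pvE k) (pvE k)
      (t, st.2 ++ [(PySem.List.pyGet? ans.1 x).getD 0])) (tree1, ([] : List Int))).2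

-- ===== PORT B =====
def resultArray_alt (nums : List Int) (k : Int) (queries : List (List Int)) : List Int :=
  let n := nums.length
  (queries.foldl (fun (st : List Int × List Int) q =>
      let idx := q.getD 0 0
      let val := q.getD 1 0
      let start := q.getD 2 0
      let x := q.getD 3 0
      let arr := st.1.set idx.toNat val
      let fin := (PySem.List.pyRange start (n : Int) 1).foldl
          (fun (rc : Int × Int) j =>
            let running := PySem.Int.mod (rc.1 * arr.getD j.toNat 0) k
            (running, if running = x then rc.2 + 1 else rc.2))
          ((1 : Int), (0 : Int))
      (arr, st.2 ++ [fin.2])) (nums, ([] : List Int))).2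

-- ===== PRECONDITION & SPEC =====
-- Pre_ excludes: k ≤ 0 except in the trivial all-empty case, and queries of length ≠ 4 (A raises);
-- x ≤ -k-1 or x ≥ k (A raises IndexError); and the remaining out-of-range query parameters
-- (idx outside [0,n), start < 0, -k ≤ x < 0), where no value is specified and each program's result
-- is an accident of its data layout: A wraps the count-vector index (counting residue x+k) or writes/
-- reads internal segment-tree slots, while B raises, wraps the list index, or counts the literal x.
def Pre_resultArray (nums : List Int) (k : Int) (queries : List (List Int)) : Prop :=
  (1 ≤ k ∨ (nums = [] ∧ queries = [])) ∧ ∀ q ∈ queries,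
    q.length = 4 ∧ 0 ≤ q.getD 0 0 ∧ q.getD 0 0 < (nums.length : Int) ∧
    0 ≤ q.getD 2 0 ∧ 0 ≤ q.getD 3 0 ∧ q.getD 3 0 < k
instance (nums : List Int) (k : Int) (queries : List (List Int)) : Decidable (Pre_resultArray nums k queries) := by unfold Pre_resultArray; infer_instance

def pvWitness_resultArray : List Int × Int × List (List Int) := ([2, 3], 3, [[0, 4, 0, 2]])

def Spec_resultArray (nums : List Int) (k : Int) (queries : List (List Int)) (out : List Int) : Prop :=
  out = resultArray_alt nums k queries
instance (nums : List Int) (k : Int) (queries : List (List Int)) (out : List Int) : Decidable (Spec_resultArray nums k queries out) := by unfold Spec_resultArray; infer_instance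

-- ===== CLAIM (what is proved, stated in full; the proofs are below) =====
def Claim_equal_resultArray : Prop := ∀ (nums : List Int) (k : Int) (queries : List (List Int)), Dom_resultArray nums k queries → Pre_resultArray nums k queries → Spec_resultArray nums k queries (resultArray nums k queries)

-- ===== LEMMAS AND PROOFS =====

-- ===== proof-only helpers =====

def pvVM (k : Int) (a : pvM) : Prop := a.1.length = k.toNat

def pvEq (k : Int) (a b : pvM) : Prop := a.1 = b.1 ∧ pvMod a.2 k = pvMod b.2 k

theorem pvMod_emod {k : Int} (hk : 0 < k) (a : Int) : pvMod a k = a % k :=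
  PySem.Int.mod_eq_emod_of_pos hk

theorem pvMod_nonneg {k : Int} (hk : 0 < k) (a : Int) : 0 ≤ pvMod a k :=
  PySem.Int.mod_nonneg a hk

theorem pvMod_lt {k : Int} (hk : 0 < k) (a : Int) : pvMod a k < k :=
  PySem.Int.mod_lt a hk

theorem pvMod_toNat_lt {k : Int} (hk : 0 < k) (a : Int) : (pvMod a k).toNat < k.toNat := by
  have h1 := pvMod_nonneg hk a
  have h2 := pvMod_lt hk a
  omega

theorem pvMod_cast_toNat {k : Int} (hk : 0 < k) (a : Int) : ((pvMod a k).toNat : Int) = pvMod a k :=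
  Int.toNat_of_nonneg (pvMod_nonneg hk a)

theorem pvMod_mul_left {k : Int} (hk : 0 < k) (a b : Int) :
    pvMod (pvMod a k * b) k = pvMod (a * b) k := by
  rw [pvMod_emod hk, pvMod_emod hk, pvMod_emod hk, Int.mul_emod, Int.emod_emod_of_dvd _ dvd_rfl,
    ← Int.mul_emod]

theorem pvMod_mul_right {k : Int} (hk : 0 < k) (a b : Int) :
    pvMod (a * pvMod b k) k = pvMod (a * b) k := by
  rw [mul_comm, pvMod_mul_left hk, mul_comm]

theorem pvMod_idem {k : Int} (hk : 0 < k) (a : Int) : pvMod (pvMod a k) k = pvMod a k := by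
  have := pvMod_mul_left hk a 1
  simpa using this

theorem pvMod_small {k : Int} (hk : 0 < k) {a : Int} (h0 : 0 ≤ a) (h1 : a < k) :
    pvMod a k = a := by
  rw [pvMod_emod hk]; exact Int.emod_eq_of_lt h0 h1

theorem pvGetD_set (l : List Int) (i : Nat) (v : Int) (x : Nat) (h : i < l.length) :
    (l.set i v).getD x 0 = if x = i then v else l.getD x 0 := by
  simp only [List.getD_eq_getElem?_getD, List.getElem?_set]
  by_cases hxi : x = i
  · simp [hxi, h]
  · rw [if_neg (fun h' => hxi h'.symm), if_neg hxi]

theorem pvGetD_replicate (m : Nat) (x : Nat) : (List.replicate m (0 : Int)).getD x 0 = 0 := by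
  simp only [List.getD_eq_getElem?_getD, List.getElem?_replicate]
  split <;> simp

theorem pvMergeFold_length (k : Int) (p : Int) (bc : List Int) :
    ∀ (l : List Nat) (c : List Int),
      (l.foldl (fun c r =>
        if bc.getD r 0 ≠ 0 then
          c.set (pvMod (p * (r : Int)) k).toNat
            (c.getD (pvMod (p * (r : Int)) k).toNat 0 + bc.getD r 0)
        else c) c).length = c.length := by
  intro l
  induction l with
  | nil => intro c; rfl
  | cons r t ih =>
    intro c
    simp only [List.foldl_cons]
    rw [ih]
    split <;> simp

theorem pvMerge_fst_length (k : Int) (a b : pvM) : (pvMerge k a b).1.length = a.1.length := by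
  simp only [pvMerge]
  exact pvMergeFold_length k a.2 b.1 (List.range k.toNat) a.1

theorem pvMerge_snd (k : Int) (a b : pvM) : (pvMerge k a b).2 = pvMod (a.2 * b.2) k := rfl

theorem pvMergeFold_getD {k : Int} (hk : 0 < k) (p : Int) (bc : List Int) :
    ∀ (m : Nat) (c : List Int), k.toNat ≤ c.length → ∀ x, x < c.length →
      ((List.range m).foldl (fun c r =>
        if bc.getD r 0 ≠ 0 then
          c.set (pvMod (p * (r : Int)) k).toNat
            (c.getD (pvMod (p * (r : Int)) k).toNat 0 + bc.getD r 0)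
        else c) c).getD x 0
      = c.getD x 0 + ∑ r ∈ Finset.range m,
          (if (pvMod (p * (r : Int)) k).toNat = x then bc.getD r 0 else 0) := by
  intro m
  induction m with
  | zero => intro c _ x _; simp
  | succ m ih =>
    intro c hc x hx
    rw [List.range_succ, List.foldl_append, List.foldl_cons, List.foldl_nil,
      Finset.sum_range_succ]
    have hlen : ((List.range m).foldl (fun c r =>
        if bc.getD r 0 ≠ 0 then
          c.set (pvMod (p * (r : Int)) k).toNat
            (c.getD (pvMod (p * (r : Int)) k).toNat 0 + bc.getD r 0)
        else c) c).length = c.length := pvMergeFold_length k p bc _ c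
    have hidx' : (pvMod (p * (m : Int)) k).toNat < c.length :=
      lt_of_lt_of_le (pvMod_toNat_lt hk _) hc
    have hidx : (pvMod (p * (m : Int)) k).toNat < ((List.range m).foldl (fun c r =>
        if bc.getD r 0 ≠ 0 then
          c.set (pvMod (p * (r : Int)) k).toNat
            (c.getD (pvMod (p * (r : Int)) k).toNat 0 + bc.getD r 0)
        else c) c).length := by rwa [hlen]
    by_cases hg : bc.getD m 0 ≠ 0
    · rw [if_pos hg, pvGetD_set _ _ _ _ hidx]
      by_cases hxm : x = (pvMod (p * (m : Int)) k).toNat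
      · subst hxm
        rw [if_pos rfl, ih c hc _ hidx', if_pos rfl]
        ring
      · rw [if_neg hxm, ih c hc x hx, if_neg (fun h => hxm h.symm)]
        ring
    · rw [if_neg hg, ih c hc x hx]
      have h0 : bc.getD m 0 = 0 := by simpa using hg
      rw [h0]
      simp

theorem pvMerge_getD {k : Int} (hk : 0 < k) (a b : pvM) (ha : pvVM k a)
    (x : Nat) (hx : x < k.toNat) :
    (pvMerge k a b).1.getD x 0
      = a.1.getD x 0 + ∑ r ∈ Finset.range k.toNat,
          (if (pvMod (a.2 * (r : Int)) k).toNat = x then b.1.getD r 0 else 0) := by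
  simp only [pvMerge]
  exact pvMergeFold_getD hk a.2 b.1 k.toNat a.1 (le_of_eq ha.symm) x (by rw [ha]; exact hx)

theorem pvCount_ext {c d : List Int} (hl : c.length = d.length)
    (h : ∀ x, x < c.length → c.getD x 0 = d.getD x 0) : c = d := by
  apply List.ext_getElem hl
  intro i h1 h2
  have := h i h1
  rwa [List.getD_eq_getElem c 0 h1, List.getD_eq_getElem d 0 h2] at this


theorem pvVM_E (k : Int) : pvVM k (pvE k) := by simp [pvVM, pvE]

theorem pvVM_leaf (k v : Int) : pvVM k (pvLeaf k v) := by simp [pvVM, pvLeaf]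

theorem pvVM_merge {k : Int} {a : pvM} (b : pvM) (ha : pvVM k a) : pvVM k (pvMerge k a b) := by
  rw [pvVM, pvMerge_fst_length]; exact ha

theorem pvEq_refl (k : Int) (a : pvM) : pvEq k a a := ⟨rfl, rfl⟩

theorem pvEq_symm {k : Int} {a b : pvM} (h : pvEq k a b) : pvEq k b a := ⟨h.1.symm, h.2.symm⟩

theorem pvEq_trans {k : Int} {a b c : pvM} (h1 : pvEq k a b) (h2 : pvEq k b c) : pvEq k a c :=
  ⟨h1.1.trans h2.1, h1.2.trans h2.2⟩

theorem pvMerge_assoc {k : Int} (hk : 0 < k) (a b c : pvM)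
    (ha : pvVM k a) (hb : pvVM k b) (_hc : pvVM k c) :
    pvMerge k (pvMerge k a b) c = pvMerge k a (pvMerge k b c) := by
  have hab : pvVM k (pvMerge k a b) := pvVM_merge b ha
  refine Prod.ext ?_ ?_
  · apply pvCount_ext
    · simp [pvMerge_fst_length]
    · intro x hxl
      have hx : x < k.toNat := by
        rwa [pvMerge_fst_length, pvMerge_fst_length, ha] at hxl
      rw [pvMerge_getD hk _ c hab x hx, pvMerge_getD hk a b ha x hx,
        pvMerge_getD hk a _ ha x hx]
      have hS3 : ∑ r ∈ Finset.range k.toNat,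
          (if (pvMod (a.2 * (r : Int)) k).toNat = x then (pvMerge k b c).1.getD r 0 else 0)
        = (∑ r ∈ Finset.range k.toNat,
            (if (pvMod (a.2 * (r : Int)) k).toNat = x then b.1.getD r 0 else 0))
          + ∑ r ∈ Finset.range k.toNat, ∑ s ∈ Finset.range k.toNat,
              (if (pvMod (a.2 * (r : Int)) k).toNat = x then
                (if (pvMod (b.2 * (s : Int)) k).toNat = r then c.1.getD s 0 else 0) else 0) := by
        rw [← Finset.sum_add_distrib]
        refine Finset.sum_congr rfl (fun r hr => ?_)
        rw [pvMerge_getD hk b c hb r (Finset.mem_range.mp hr)]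
        by_cases h : (pvMod (a.2 * (r : Int)) k).toNat = x
        · simp only [if_pos h]
        · simp only [if_neg h]; simp
      rw [hS3]
      have hT : ∑ r ∈ Finset.range k.toNat, ∑ s ∈ Finset.range k.toNat,
              (if (pvMod (a.2 * (r : Int)) k).toNat = x then
                (if (pvMod (b.2 * (s : Int)) k).toNat = r then c.1.getD s 0 else 0) else 0)
          = ∑ s ∈ Finset.range k.toNat,
              (if (pvMod ((pvMerge k a b).2 * (s : Int)) k).toNat = x then c.1.getD s 0 else 0) := by
        rw [Finset.sum_comm]
        refine Finset.sum_congr rfl (fun s hs => ?_)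
        have hcomm : ∀ r ∈ Finset.range k.toNat,
            (if (pvMod (a.2 * (r : Int)) k).toNat = x then
              (if (pvMod (b.2 * (s : Int)) k).toNat = r then c.1.getD s 0 else 0) else 0)
            = (if (pvMod (b.2 * (s : Int)) k).toNat = r then
              (if (pvMod (a.2 * (r : Int)) k).toNat = x then c.1.getD s 0 else 0) else 0) := by
          intro r _; split_ifs <;> rfl
        rw [Finset.sum_congr rfl hcomm, Finset.sum_ite_eq,
          if_pos (Finset.mem_range.mpr (pvMod_toNat_lt hk _))]
        have hcond : pvMod (a.2 * ((pvMod (b.2 * (s : Int)) k).toNat : Int)) k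
            = pvMod ((pvMerge k a b).2 * (s : Int)) k := by
          rw [pvMod_cast_toNat hk, pvMod_mul_right hk, pvMerge_snd, pvMod_mul_left hk, mul_assoc]
        rw [hcond]
      rw [hT]
      ring
  · show pvMod ((pvMerge k a b).2 * c.2) k = pvMod (a.2 * (pvMerge k b c).2) k
    rw [pvMerge_snd, pvMerge_snd, pvMod_mul_left hk, pvMod_mul_right hk, mul_assoc]

theorem pvMerge_e_right (k : Int) (a : pvM) : pvMerge k a (pvE k) = (a.1, pvMod a.2 k) := by
  refine Prod.ext ?_ ?_
  · show (List.range k.toNat).foldl _ a.1 = a.1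
    generalize List.range k.toNat = l
    induction l with
    | nil => rfl
    | cons r t ih =>
      rw [List.foldl_cons]
      have h0 : (pvE k).1.getD r 0 = 0 := pvGetD_replicate _ _
      rw [if_neg (by rw [h0]; exact fun h => h rfl)]
      exact ih
  · show pvMod (a.2 * (pvE k).2) k = pvMod a.2 k
    simp [pvE]

theorem pvMerge_e_left {k : Int} (hk : 0 < k) (b : pvM) (hb : pvVM k b) :
    pvMerge k (pvE k) b = (b.1, pvMod b.2 k) := by
  refine Prod.ext ?_ ?_
  · apply pvCount_ext
    · rw [pvMerge_fst_length]
      show (List.replicate k.toNat (0 : Int)).length = b.1.length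
      rw [List.length_replicate, hb]
    · intro x hxl
      have hx : x < k.toNat := by
        rw [pvMerge_fst_length] at hxl
        simpa [pvE] using hxl
      rw [pvMerge_getD hk _ b (pvVM_E k) x hx]
      have hterm : ∀ r ∈ Finset.range k.toNat,
          (if (pvMod ((pvE k).2 * (r : Int)) k).toNat = x then b.1.getD r 0 else 0)
          = (if r = x then b.1.getD r 0 else 0) := by
        intro r hr
        have hrK := Finset.mem_range.mp hr
        have h1 : pvMod ((pvE k).2 * (r : Int)) k = (r : Int) := by
          show pvMod (1 * (r : Int)) k = (r : Int)
          rw [one_mul]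
          exact pvMod_small hk (by positivity) (by omega)
        rw [h1]
        simp
      rw [Finset.sum_congr rfl hterm, Finset.sum_ite_eq', if_pos (Finset.mem_range.mpr hx)]
      show (pvE k).1.getD x 0 + b.1.getD x 0 = b.1.getD x 0
      rw [show (pvE k).1 = List.replicate k.toNat (0:Int) from rfl, pvGetD_replicate]
      ring
  · show pvMod ((pvE k).2 * b.2) k = pvMod b.2 k
    simp [pvE]

theorem pvMerge_normL {k : Int} (hk : 0 < k) (a b : pvM) :
    pvMerge k (a.1, pvMod a.2 k) b = pvMerge k a b := by
  simp only [pvMerge, pvMod_mul_left hk]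

theorem pvMerge_normR {k : Int} (hk : 0 < k) (a b : pvM) :
    pvMerge k a (b.1, pvMod b.2 k) = pvMerge k a b := by
  simp only [pvMerge, pvMod_mul_right hk]

theorem pvEq_norm {k : Int} (hk : 0 < k) (a : pvM) : pvEq k a (a.1, pvMod a.2 k) :=
  ⟨rfl, (pvMod_idem hk a.2).symm⟩

theorem pvEq_of_eq {k : Int} {a b : pvM} (h : a = b) : pvEq k a b := by subst h; exact ⟨rfl, rfl⟩

theorem pvMerge_congr {k : Int} (hk : 0 < k) {a a' b b' : pvM}
    (h1 : pvEq k a a') (h2 : pvEq k b b') : pvMerge k a b = pvMerge k a' b' := by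
  rw [← pvMerge_normL hk a b, ← pvMerge_normR hk _ b, h1.1, h1.2, h2.1, h2.2,
    pvMerge_normR hk, pvMerge_normL hk]

def pvFold (k : Int) (ls : List pvM) : pvM := ls.foldl (pvMerge k) (pvE k)

theorem pvVM_foldl {k : Int} : ∀ (ls : List pvM) (a : pvM), pvVM k a → pvVM k (ls.foldl (pvMerge k) a) := by
  intro ls
  induction ls with
  | nil => intro a ha; exact ha
  | cons y t ih => intro a ha; exact ih _ (pvVM_merge y ha)

theorem pvVM_fold {k : Int} (ls : List pvM) : pvVM k (pvFold k ls) :=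
  pvVM_foldl ls _ (pvVM_E k)

theorem pvFold_eqm {k : Int} (hk : 0 < k) :
    ∀ (ls : List pvM) (a : pvM), pvVM k a → (∀ y ∈ ls, pvVM k y) →
      pvEq k (ls.foldl (pvMerge k) a) (pvMerge k a (pvFold k ls)) := by
  intro ls
  induction ls with
  | nil =>
    intro a ha _
    rw [show pvFold k ([] : List pvM) = pvE k from rfl, pvMerge_e_right]
    exact pvEq_norm hk a
  | cons y t ih =>
    intro a ha hall
    have hy : pvVM k y := hall y List.mem_cons_self
    have ht : ∀ z ∈ t, pvVM k z := fun z hz => hall z (List.mem_cons_of_mem _ hz)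
    have hVF : pvVM k (pvFold k t) := pvVM_fold t
    have hFy : pvEq k (pvFold k (y :: t)) (pvMerge k y (pvFold k t)) := by
      have h2 := ih (pvMerge k (pvE k) y) (pvVM_merge y (pvVM_E k)) ht
      have heq : pvMerge k (pvMerge k (pvE k) y) (pvFold k t) = pvMerge k y (pvFold k t) := by
        rw [pvMerge_e_left hk y hy, pvMerge_normL hk]
      exact pvEq_trans h2 (pvEq_of_eq heq)
    have hgoal : pvMerge k a (pvFold k (y :: t)) = pvMerge k a (pvMerge k y (pvFold k t)) :=
      pvMerge_congr hk (pvEq_refl k a) hFy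
    rw [List.foldl_cons, hgoal, ← pvMerge_assoc hk a y (pvFold k t) ha hy hVF]
    exact ih (pvMerge k a y) (pvVM_merge y ha) ht

theorem pvFold_cons_eqm {k : Int} (hk : 0 < k) (y : pvM) (t : List pvM)
    (hy : pvVM k y) (ht : ∀ z ∈ t, pvVM k z) :
    pvEq k (pvFold k (y :: t)) (pvMerge k y (pvFold k t)) := by
  have h2 := pvFold_eqm hk t (pvMerge k (pvE k) y) (pvVM_merge y (pvVM_E k)) ht
  have heq : pvMerge k (pvMerge k (pvE k) y) (pvFold k t) = pvMerge k y (pvFold k t) := by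
    rw [pvMerge_e_left hk y hy, pvMerge_normL hk]
  exact pvEq_trans h2 (pvEq_of_eq heq)

theorem pvFold_append_eqm {k : Int} (hk : 0 < k) (xs ys : List pvM)
    (hys : ∀ z ∈ ys, pvVM k z) :
    pvEq k (pvFold k (xs ++ ys)) (pvMerge k (pvFold k xs) (pvFold k ys)) := by
  show pvEq k ((xs ++ ys).foldl (pvMerge k) (pvE k)) _
  rw [List.foldl_append]
  exact pvFold_eqm hk ys (pvFold k xs) (pvVM_fold xs) hys

theorem pvFold_singleton_eqm {k : Int} (hk : 0 < k) (y : pvM) (hy : pvVM k y) :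
    pvEq k (pvFold k [y]) y := by
  show pvEq k (pvMerge k (pvE k) y) y
  rw [pvMerge_e_left hk y hy]
  exact pvEq_symm (pvEq_norm hk y)

def pvRow (k : Int) (tree : List pvM) (l r : Nat) : List pvM :=
  (List.range' l (r + 1 - l)).map (pvT k tree)

def pvGood (k : Int) (size : Nat) (tree : List pvM) : Prop :=
  ∀ p, 1 ≤ p → p < size → pvT k tree p = pvMerge k (pvT k tree (2*p)) (pvT k tree (2*p+1))

def pvValidT (k : Int) (tree : List pvM) : Prop := ∀ p, pvVM k (pvT k tree p)

theorem pvRow_VM {k : Int} {tree : List pvM} (valid : pvValidT k tree) (l r : Nat) :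
    ∀ z ∈ pvRow k tree l r, pvVM k z := by
  intro z hz
  obtain ⟨p, _, hp⟩ := List.mem_map.mp hz
  exact hp ▸ valid p

theorem pvRow_empty {k : Int} (tree : List pvM) {l r : Nat} (h : r < l) :
    pvRow k tree l r = [] := by
  rw [pvRow, show r + 1 - l = 0 by omega]
  rfl

theorem pvRow_single (k : Int) (tree : List pvM) (l : Nat) :
    pvRow k tree l l = [pvT k tree l] := by
  rw [pvRow, show l + 1 - l = 1 by omega]
  rfl

theorem pvRow_cons {k : Int} (tree : List pvM) {l r : Nat} (h : l ≤ r) :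
    pvRow k tree l r = pvT k tree l :: pvRow k tree (l+1) r := by
  rw [pvRow, show r + 1 - l = (r - l) + 1 by omega, List.range'_succ, pvRow,
    show r + 1 - (l+1) = r - l by omega, List.map_cons]

theorem pvRow_concat {k : Int} (tree : List pvM) {l r : Nat} (hl : l ≤ r) (hr : 1 ≤ r) :
    pvRow k tree l r = pvRow k tree l (r-1) ++ [pvT k tree r] := by
  rw [pvRow, show r + 1 - l = (r - l) + 1 by omega, List.range'_concat, pvRow,
    show r - 1 + 1 - l = r - l by omega, List.map_append]
  rw [show l + 1*(r-l) = r from by omega]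
  rfl

theorem pvHalve {k : Int} (hk : 0 < k) {size : Nat} {tree : List pvM}
    (good : pvGood k size tree) (valid : pvValidT k tree) :
    ∀ (m l : Nat), 1 ≤ l → l % 2 = 0 → l + 2*m ≤ 2*size →
      pvEq k (pvFold k ((List.range' l (2*m)).map (pvT k tree)))
             (pvFold k ((List.range' (l/2) m).map (pvT k tree))) := by
  intro m
  induction m with
  | zero => intro l _ _ _; exact pvEq_refl k _
  | succ m ih =>
    intro l hl1 hl2 hbound
    have hle2 : 2 ≤ l := by omega
    have h2l : 2 * (l / 2) = l := by omega
    have hpar : 1 ≤ l / 2 := by omega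
    have hpsz : l / 2 < size := by omega
    rw [show 2*(m+1) = (2*m + 1) + 1 from by ring, List.range'_succ, List.range'_succ,
      List.map_cons, List.map_cons, List.range'_succ, List.map_cons]
    -- goal: pvEq (pvFold (t l :: t (l+1) :: rest)) (pvFold (t (l/2) :: rest'))
    have hVl := valid l
    have hVl1 := valid (l+1)
    have hrest : ∀ z ∈ (List.range' (l+1+1) (2*m)).map (pvT k tree), pvVM k z := by
      intro z hz
      obtain ⟨p, _, hp⟩ := List.mem_map.mp hz
      exact hp ▸ valid p
    have hrest' : ∀ z ∈ (List.range' (l/2 + 1) m).map (pvT k tree), pvVM k z := by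
      intro z hz
      obtain ⟨p, _, hp⟩ := List.mem_map.mp hz
      exact hp ▸ valid p
    have hVrest : pvVM k (pvFold k ((List.range' (l+1+1) (2*m)).map (pvT k tree))) := pvVM_fold _
    -- left side
    have h1 : pvEq k (pvFold k (pvT k tree l :: pvT k tree (l+1) :: (List.range' (l+1+1) (2*m)).map (pvT k tree)))
        (pvMerge k (pvT k tree l) (pvFold k (pvT k tree (l+1) :: (List.range' (l+1+1) (2*m)).map (pvT k tree)))) :=
      pvFold_cons_eqm hk _ _ hVl (by
        intro z hz
        rcases List.mem_cons.mp hz with h | h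
        · exact h ▸ hVl1
        · exact hrest z h)
    have h2 : pvEq k (pvFold k (pvT k tree (l+1) :: (List.range' (l+1+1) (2*m)).map (pvT k tree)))
        (pvMerge k (pvT k tree (l+1)) (pvFold k ((List.range' (l+1+1) (2*m)).map (pvT k tree)))) :=
      pvFold_cons_eqm hk _ _ hVl1 hrest
    have h3 : pvMerge k (pvT k tree l) (pvMerge k (pvT k tree (l+1)) (pvFold k ((List.range' (l+1+1) (2*m)).map (pvT k tree))))
        = pvMerge k (pvMerge k (pvT k tree l) (pvT k tree (l+1))) (pvFold k ((List.range' (l+1+1) (2*m)).map (pvT k tree))) :=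
      (pvMerge_assoc hk _ _ _ hVl hVl1 hVrest).symm
    have hgood : pvMerge k (pvT k tree l) (pvT k tree (l+1)) = pvT k tree (l/2) := by
      have := good (l/2) hpar hpsz
      rw [h2l] at this
      exact this.symm
    have hIH := ih (l+2) (by omega) (by omega) (by omega)
    rw [show (l+2)/2 = l/2 + 1 from by omega] at hIH
    have hIH' : pvEq k (pvFold k ((List.range' (l+1+1) (2*m)).map (pvT k tree)))
        (pvFold k ((List.range' (l/2+1) m).map (pvT k tree))) := by
      rw [show l+1+1 = l+2 from rfl]
      exact hIH
    -- combine
    refine pvEq_trans h1 ?_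
    refine pvEq_trans (pvEq_of_eq (pvMerge_congr hk (pvEq_refl k _) h2)) ?_
    refine pvEq_trans (pvEq_of_eq h3) ?_
    rw [hgood]
    refine pvEq_trans (pvEq_of_eq (pvMerge_congr hk (pvEq_refl k _) hIH')) ?_
    exact pvEq_symm (pvFold_cons_eqm hk _ _ (valid _) hrest')

theorem pvHalveRow {k : Int} (hk : 0 < k) {size : Nat} {tree : List pvM}
    (good : pvGood k size tree) (valid : pvValidT k tree) {l r : Nat}
    (hl1 : 1 ≤ l) (hev : l % 2 = 0) (hodd : r % 2 = 1) (hle : l ≤ r) (hb : r < 2*size) :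
    pvEq k (pvFold k (pvRow k tree l r)) (pvFold k (pvRow k tree (l/2) (r/2))) := by
  have h1 : r + 1 - l = 2 * ((r + 1 - l)/2) := by omega
  have h2 : r/2 + 1 - l/2 = (r + 1 - l)/2 := by omega
  rw [pvRow, pvRow, h2]
  rw [show List.range' l (r + 1 - l) = List.range' l (2 * ((r + 1 - l)/2)) from by rw [← h1]]
  exact pvHalve hk good valid ((r + 1 - l)/2) l hl1 hev (by omega)

theorem pvShuffle {k : Int} (hk : 0 < k) (a p S q b : pvM)
    (hva : pvVM k a) (hvp : pvVM k p) (hvS : pvVM k S) (hvq : pvVM k q) (hvb : pvVM k b) :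
    pvMerge k (pvMerge k a (pvMerge k p (pvMerge k S q))) b
      = pvMerge k (pvMerge k (pvMerge k a p) S) (pvMerge k q b) := by
  rw [← pvMerge_assoc hk p S q hvp hvS hvq,
    ← pvMerge_assoc hk a (pvMerge k p S) q hva (pvVM_merge _ hvp) hvq,
    pvMerge_assoc hk (pvMerge k a (pvMerge k p S)) q b (pvVM_merge _ hva) hvq hvb,
    ← pvMerge_assoc hk a p S hva hvp hvS]

theorem pvQ2_spec {k : Int} (hk : 0 < k) {size : Nat} {tree : List pvM}
    (good : pvGood k size tree) (valid : pvValidT k tree) :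
    ∀ (fuel l r : Nat) (accL accR : pvM), r < fuel → 1 ≤ l → r < 2*size →
      pvVM k accL → pvVM k accR →
      pvEq k (pvQ2 k tree fuel l r accL accR)
        (pvMerge k (pvMerge k accL (pvFold k (pvRow k tree l r))) accR) := by
  intro fuel
  induction fuel with
  | zero => intro l r accL accR h _ _ _ _; omega
  | succ f ih =>
    intro l r accL accR hfuel hl hr hVL hVR
    by_cases hle : l ≤ r
    · by_cases heq : l = r
      · subst heq
        have hrow : pvEq k (pvFold k (pvRow k tree l l)) (pvT k tree l) := by
          rw [pvRow_single]
          exact pvFold_singleton_eqm hk _ (valid l)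
        have hrw : pvMerge k (pvMerge k accL (pvFold k (pvRow k tree l l))) accR
            = pvMerge k (pvMerge k accL (pvT k tree l)) accR :=
          pvMerge_congr hk (pvEq_of_eq (pvMerge_congr hk (pvEq_refl k accL) hrow)) (pvEq_refl k accR)
        rw [hrw]
        simp only [pvQ2, le_refl, if_true]
        exact pvEq_refl k _
      · have hlt : l < r := by omega
        have hlge2 : l % 2 = 1 ∨ 2 ≤ l := by omega
        simp only [pvQ2]
        rw [if_pos hle, if_neg heq]
        split_ifs with hlp hrp hrp
        -- case 1: l odd, r even
        · have hrge1 : 1 ≤ r := by omega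
          have hVtl := valid l
          have hVtr := valid r
          have hS' : pvVM k (pvFold k (pvRow k tree (l+1) (r-1))) := pvVM_fold _
          have hihap := ih ((l+1)/2) ((r-1)/2) (pvMerge k accL (pvT k tree l))
            (pvMerge k (pvT k tree r) accR) (by omega) (by omega) (by omega)
            (pvVM_merge _ hVL) (pvVM_merge _ (valid r))
          refine pvEq_trans hihap (pvEq_symm ?_)
          have hdec1 : pvRow k tree l r = pvT k tree l :: pvRow k tree (l+1) r :=
            pvRow_cons tree hle
          have hdec2 : pvRow k tree (l+1) r = pvRow k tree (l+1) (r-1) ++ [pvT k tree r] :=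
            pvRow_concat tree (by omega) hrge1
          have hc1 : pvEq k (pvFold k (pvRow k tree l r))
              (pvMerge k (pvT k tree l) (pvFold k (pvRow k tree (l+1) r))) := by
            rw [hdec1]
            exact pvFold_cons_eqm hk _ _ hVtl (pvRow_VM valid _ _)
          have hc2 : pvEq k (pvFold k (pvRow k tree (l+1) r))
              (pvMerge k (pvFold k (pvRow k tree (l+1) (r-1))) (pvT k tree r)) := by
            rw [hdec2]
            refine pvEq_trans (pvFold_append_eqm hk _ _ (by intro z hz; simp at hz; exact hz ▸ hVtr)) ?_
            exact pvEq_of_eq (pvMerge_congr hk (pvEq_refl k _) (pvFold_singleton_eqm hk _ hVtr))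
          have hc3 : pvEq k (pvFold k (pvRow k tree l r))
              (pvMerge k (pvT k tree l) (pvMerge k (pvFold k (pvRow k tree (l+1) (r-1))) (pvT k tree r))) :=
            pvEq_trans hc1 (pvEq_of_eq (pvMerge_congr hk (pvEq_refl k _) hc2))
          refine pvEq_trans (pvEq_of_eq (pvMerge_congr hk (pvEq_of_eq (pvMerge_congr hk (pvEq_refl k accL) hc3)) (pvEq_refl k accR))) ?_
          rw [pvShuffle hk accL (pvT k tree l) _ (pvT k tree r) accR hVL hVtl hS' hVtr hVR]
          -- relate halved row
          by_cases hcross : l + 1 ≤ r - 1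
          · have hhalve := pvHalveRow hk good valid (l := l+1) (r := r-1)
              (by omega) (by omega) (by omega) hcross (by omega)
            exact pvEq_of_eq (pvMerge_congr hk (pvEq_of_eq (pvMerge_congr hk (pvEq_refl k _) hhalve)) (pvEq_refl k _))
          · have hempty1 : pvRow k tree (l+1) (r-1) = [] := pvRow_empty tree (by omega)
            have hempty2 : pvRow k tree ((l+1)/2) ((r-1)/2) = [] := pvRow_empty tree (by omega)
            rw [hempty1, hempty2]
            exact pvEq_refl k _
        -- case 2: l odd, r odd
        · have hVtl := valid l
          have hS' : pvVM k (pvFold k (pvRow k tree (l+1) r)) := pvVM_fold _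
          have hihap := ih ((l+1)/2) (r/2) (pvMerge k accL (pvT k tree l)) accR
            (by omega) (by omega) (by omega) (pvVM_merge _ hVL) hVR
          refine pvEq_trans hihap (pvEq_symm ?_)
          have hc1 : pvEq k (pvFold k (pvRow k tree l r))
              (pvMerge k (pvT k tree l) (pvFold k (pvRow k tree (l+1) r))) := by
            rw [pvRow_cons tree hle]
            exact pvFold_cons_eqm hk _ _ hVtl (pvRow_VM valid _ _)
          refine pvEq_trans (pvEq_of_eq (pvMerge_congr hk (pvEq_of_eq (pvMerge_congr hk (pvEq_refl k accL) hc1)) (pvEq_refl k accR))) ?_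
          rw [← pvMerge_assoc hk accL (pvT k tree l) _ hVL hVtl hS']
          have hhalve := pvHalveRow hk good valid (l := l+1) (r := r)
            (by omega) (by omega) (by omega) (by omega) (by omega)
          exact pvEq_of_eq (pvMerge_congr hk (pvEq_of_eq (pvMerge_congr hk (pvEq_refl k _) hhalve)) (pvEq_refl k _))
        -- case 3: l even, r even
        · have hrge1 : 1 ≤ r := by omega
          have hVtr := valid r
          have hS' : pvVM k (pvFold k (pvRow k tree l (r-1))) := pvVM_fold _
          have hihap := ih (l/2) ((r-1)/2) accL (pvMerge k (pvT k tree r) accR)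
            (by omega) (by omega) (by omega) hVL (pvVM_merge _ hVtr)
          refine pvEq_trans hihap (pvEq_symm ?_)
          have hc2 : pvEq k (pvFold k (pvRow k tree l r))
              (pvMerge k (pvFold k (pvRow k tree l (r-1))) (pvT k tree r)) := by
            rw [pvRow_concat tree hle hrge1]
            refine pvEq_trans (pvFold_append_eqm hk _ _ (by intro z hz; simp at hz; exact hz ▸ hVtr)) ?_
            exact pvEq_of_eq (pvMerge_congr hk (pvEq_refl k _) (pvFold_singleton_eqm hk _ hVtr))
          refine pvEq_trans (pvEq_of_eq (pvMerge_congr hk (pvEq_of_eq (pvMerge_congr hk (pvEq_refl k accL) hc2)) (pvEq_refl k accR))) ?_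
          rw [← pvMerge_assoc hk accL _ (pvT k tree r) hVL hS' hVtr,
            pvMerge_assoc hk (pvMerge k accL (pvFold k (pvRow k tree l (r-1)))) (pvT k tree r) accR
              (pvVM_merge _ hVL) hVtr hVR]
          have hhalve := pvHalveRow hk good valid (l := l) (r := r-1)
            (by omega) (by omega) (by omega) (by omega) (by omega)
          exact pvEq_of_eq (pvMerge_congr hk (pvEq_of_eq (pvMerge_congr hk (pvEq_refl k _) hhalve)) (pvEq_refl k _))
        -- case 4: l even, r odd
        · have hihap := ih (l/2) (r/2) accL accR (by omega) (by omega) (by omega) hVL hVR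
          refine pvEq_trans hihap (pvEq_symm ?_)
          have hhalve := pvHalveRow hk good valid (l := l) (r := r)
            (by omega) (by omega) (by omega) (by omega) (by omega)
          exact pvEq_of_eq (pvMerge_congr hk (pvEq_of_eq (pvMerge_congr hk (pvEq_refl k _) hhalve)) (pvEq_refl k _))
    · simp only [pvQ2]
      rw [if_neg hle]
      have hrow : pvRow k tree l r = [] := pvRow_empty tree (by omega)
      rw [hrow]
      show pvEq k (pvMerge k accL accR) (pvMerge k (pvMerge k accL (pvE k)) accR)
      rw [pvMerge_e_right, pvMerge_normL hk]
      exact pvEq_refl k _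

theorem pvSizeGo_ge (n : Nat) : ∀ (f s : Nat), 1 ≤ s → n ≤ 2^f * s →
    n ≤ pvSizeGo f n s ∧ 1 ≤ pvSizeGo f n s := by
  intro f
  induction f with
  | zero =>
    intro s h1 h2
    simp only [pvSizeGo]
    constructor
    · simpa using h2
    · exact h1
  | succ f ih =>
    intro s h1 h2
    simp only [pvSizeGo]
    split
    · refine ih (s*2) (by omega) ?_
      have h3 : 2^(f+1) * s = 2^f * (s*2) := by ring
      omega
    · constructor <;> omega

theorem pvSize_ge (n : Nat) : n ≤ pvSize n ∧ 1 ≤ pvSize n := by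
  refine pvSizeGo_ge n n 1 le_rfl ?_
  have := Nat.lt_two_pow_self (n := n)
  omega

theorem pvT_set {k : Int} (tree : List pvM) (j : Nat) (v : pvM) (p : Nat) (hj : j < tree.length) :
    pvT k (tree.set j v) p = if p = j then v else pvT k tree p := by
  simp only [pvT, List.getD_eq_getElem?_getD, List.getElem?_set]
  by_cases h : p = j
  · simp [h, hj]
  · rw [if_neg (fun h' => h h'.symm), if_neg h]

theorem pvT_replicate (k : Int) (m p : Nat) : pvT k (List.replicate m (pvE k)) p = pvE k := by
  simp only [pvT, List.getD_eq_getElem?_getD, List.getElem?_replicate]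
  split <;> simp

def pvInv (k : Int) (size : Nat) (tree : List pvM) (copy : List Int) : Prop :=
  tree.length = 2*size ∧ pvValidT k tree ∧ pvGood k size tree ∧
  (∀ i : Nat, pvT k tree (size+i) = if i < copy.length then pvLeaf k (copy.getD i 0) else pvE k)

theorem pvBuildLeaves_spec (k : Int) (size : Nat) (nums : List Int) (hsz : nums.length ≤ size) :
    ∀ m, m ≤ nums.length →
      (((List.range m).foldl (fun t i => t.set (size + i) (pvLeaf k (nums.getD i 0)))
          (List.replicate (2*size) (pvE k))).length = 2*size)
      ∧ (∀ p, p < size → pvT k ((List.range m).foldl (fun t i => t.set (size + i) (pvLeaf k (nums.getD i 0)))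
          (List.replicate (2*size) (pvE k))) p = pvE k)
      ∧ (∀ i : Nat, pvT k ((List.range m).foldl (fun t i => t.set (size + i) (pvLeaf k (nums.getD i 0)))
          (List.replicate (2*size) (pvE k))) (size+i) = if i < m then pvLeaf k (nums.getD i 0) else pvE k) := by
  intro m
  induction m with
  | zero =>
    intro _
    refine ⟨by simp, fun p _ => pvT_replicate k _ p, fun i => ?_⟩
    rw [if_neg (by omega)]
    exact pvT_replicate k _ _
  | succ m ih =>
    intro hm
    obtain ⟨hlen, hint, hleaf⟩ := ih (by omega)
    rw [List.range_succ, List.foldl_append, List.foldl_cons, List.foldl_nil]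
    have hposlt : size + m < (((List.range m).foldl (fun t i => t.set (size + i) (pvLeaf k (nums.getD i 0)))
        (List.replicate (2*size) (pvE k)))).length := by omega
    refine ⟨by rw [List.length_set]; exact hlen, ?_, ?_⟩
    · intro p hp
      rw [pvT_set _ _ _ _ hposlt, if_neg (by omega)]
      exact hint p hp
    · intro i
      rw [pvT_set _ _ _ _ hposlt]
      by_cases hi : i = m
      · subst hi
        rw [if_pos (by omega), if_pos (by omega)]
      · rw [if_neg (by omega), hleaf i]
        by_cases hilt : i < m
        · rw [if_pos hilt, if_pos (by omega)]
        · rw [if_neg hilt, if_neg (by omega)]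

theorem pvBuildUp_spec {k : Int} {size : Nat} :
    ∀ (m : Nat) (tree : List pvM), m < size → tree.length = 2*size →
      pvValidT k tree →
      (∀ p, m < p → p < size → pvT k tree p = pvMerge k (pvT k tree (2*p)) (pvT k tree (2*p+1))) →
      (pvBuildUp k m tree).length = 2*size ∧ pvValidT k (pvBuildUp k m tree) ∧
        pvGood k size (pvBuildUp k m tree) ∧
        (∀ p, size ≤ p → pvT k (pvBuildUp k m tree) p = pvT k tree p) := by
  intro m
  induction m with
  | zero =>
    intro tree _ hlen hV hG
    refine ⟨hlen, hV, ?_, fun p _ => rfl⟩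
    intro p h1 h2
    exact hG p (by omega) h2
  | succ m ih =>
    intro tree hm hlen hV hG
    simp only [pvBuildUp]
    have hm1lt : m+1 < tree.length := by omega
    have hTset : ∀ p, pvT k (tree.set (m+1) (pvMerge k (pvT k tree (2*(m+1))) (pvT k tree (2*(m+1)+1)))) p
        = if p = m+1 then pvMerge k (pvT k tree (2*(m+1))) (pvT k tree (2*(m+1)+1)) else pvT k tree p :=
      fun p => pvT_set tree (m+1) _ p hm1lt
    have hlen' : (tree.set (m+1) (pvMerge k (pvT k tree (2*(m+1))) (pvT k tree (2*(m+1)+1)))).length = 2*size := by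
      rw [List.length_set]; exact hlen
    have hV' : pvValidT k (tree.set (m+1) (pvMerge k (pvT k tree (2*(m+1))) (pvT k tree (2*(m+1)+1)))) := by
      intro p
      rw [hTset p]
      split
      · exact pvVM_merge _ (hV _)
      · exact hV p
    have hG' : ∀ p, m < p → p < size →
        pvT k (tree.set (m+1) (pvMerge k (pvT k tree (2*(m+1))) (pvT k tree (2*(m+1)+1)))) p
        = pvMerge k (pvT k (tree.set (m+1) (pvMerge k (pvT k tree (2*(m+1))) (pvT k tree (2*(m+1)+1)))) (2*p))
            (pvT k (tree.set (m+1) (pvMerge k (pvT k tree (2*(m+1))) (pvT k tree (2*(m+1)+1)))) (2*p+1)) := by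
      intro p hp1 hp2
      rw [hTset p, hTset (2*p), hTset (2*p+1), if_neg (by omega : ¬(2*p = m+1)),
        if_neg (by omega : ¬(2*p+1 = m+1))]
      by_cases hp : p = m+1
      · rw [if_pos hp, hp]
      · rw [if_neg hp]
        exact hG p (by omega) hp2
    obtain ⟨a, b, c, d⟩ := ih _ (by omega) hlen' hV' hG'
    exact ⟨a, b, c, fun p hp => by rw [d p hp, hTset p, if_neg (by omega)]⟩

theorem pvUpdLoop_spec {k : Int} {size : Nat} :
    ∀ (fuel pos : Nat) (tree : List pvM), pos < fuel → pos < size → tree.length = 2*size →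
      pvValidT k tree →
      (∀ q, 1 ≤ q → q < size → (∀ j : Nat, pos / 2^j ≠ q) →
        pvT k tree q = pvMerge k (pvT k tree (2*q)) (pvT k tree (2*q+1))) →
      (pvUpdLoop k fuel tree pos).length = 2*size ∧ pvValidT k (pvUpdLoop k fuel tree pos) ∧
        pvGood k size (pvUpdLoop k fuel tree pos) ∧
        (∀ p, size ≤ p → pvT k (pvUpdLoop k fuel tree pos) p = pvT k tree p) := by
  intro fuel
  induction fuel with
  | zero => intro pos tree h; omega
  | succ f ih =>
    intro pos tree hfuel hpos hlen hV hG
    simp only [pvUpdLoop]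
    by_cases hp0 : pos = 0
    · rw [if_pos hp0]
      refine ⟨hlen, hV, ?_, fun p _ => rfl⟩
      intro q hq1 hq2
      refine hG q hq1 hq2 (fun j => ?_)
      rw [hp0, Nat.zero_div]
      omega
    · rw [if_neg hp0]
      have hposlt : pos < tree.length := by omega
      have hTset : ∀ p, pvT k (tree.set pos (pvMerge k (pvT k tree (2*pos)) (pvT k tree (2*pos+1)))) p
          = if p = pos then pvMerge k (pvT k tree (2*pos)) (pvT k tree (2*pos+1)) else pvT k tree p :=
        fun p => pvT_set tree pos _ p hposlt
      have hdiv : ∀ j : Nat, (pos/2) / 2^j = pos / 2^(j+1) := by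
        intro j
        rw [Nat.div_div_eq_div_mul, pow_succ, mul_comm 2 (2^j), mul_comm (2^j) 2]
      have hlen' : (tree.set pos (pvMerge k (pvT k tree (2*pos)) (pvT k tree (2*pos+1)))).length = 2*size := by
        rw [List.length_set]; exact hlen
      have hV' : pvValidT k (tree.set pos (pvMerge k (pvT k tree (2*pos)) (pvT k tree (2*pos+1)))) := by
        intro p
        rw [hTset p]
        split
        · exact pvVM_merge _ (hV _)
        · exact hV p
      have hG' : ∀ q, 1 ≤ q → q < size → (∀ j : Nat, (pos/2) / 2^j ≠ q) →
          pvT k (tree.set pos (pvMerge k (pvT k tree (2*pos)) (pvT k tree (2*pos+1)))) q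
          = pvMerge k (pvT k (tree.set pos (pvMerge k (pvT k tree (2*pos)) (pvT k tree (2*pos+1)))) (2*q))
              (pvT k (tree.set pos (pvMerge k (pvT k tree (2*pos)) (pvT k tree (2*pos+1)))) (2*q+1)) := by
        intro q hq1 hq2 hnanc
        have hch1 : ¬(2*q = pos) := by
          intro h
          have := hnanc 0
          simp only [pow_zero, Nat.div_one] at this
          omega
        have hch2 : ¬(2*q+1 = pos) := by
          intro h
          have := hnanc 0
          simp only [pow_zero, Nat.div_one] at this
          omega
        rw [hTset q, hTset (2*q), hTset (2*q+1), if_neg hch1, if_neg hch2]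
        by_cases hq : q = pos
        · rw [if_pos hq, hq]
        · rw [if_neg hq]
          refine hG q hq1 hq2 (fun j => ?_)
          match j with
          | 0 => simpa using fun h => hq h.symm
          | j+1 =>
            rw [← hdiv j]
            exact hnanc j
      obtain ⟨a, b, c, d⟩ := ih (pos/2) _ (by omega) (by omega) hlen' hV' hG'
      exact ⟨a, b, c, fun p hp => by rw [d p hp, hTset p, if_neg (by omega)]⟩

theorem pvUpdate_inv {k : Int} {size : Nat} (tree : List pvM) (copy : List Int) (idx val : Int)
    (hinv : pvInv k size tree copy) (hcs : copy.length ≤ size)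
    (hidx : 0 ≤ idx) (hidxlt : idx < (copy.length : Int)) :
    pvInv k size (pvUpdate k size tree idx val) (copy.set idx.toNat val) := by
  obtain ⟨hlen, hV, hG, hleaf⟩ := hinv
  have hitn : idx.toNat < copy.length := by omega
  have hposlt : size + idx.toNat < tree.length := by omega
  have hTset : ∀ p, pvT k (tree.set (size + idx.toNat) (pvLeaf k val)) p
      = if p = size + idx.toNat then pvLeaf k val else pvT k tree p :=
    fun p => pvT_set tree _ _ p hposlt
  have hlen' : (tree.set (size + idx.toNat) (pvLeaf k val)).length = 2*size := by
    rw [List.length_set]; exact hlen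
  have hV' : pvValidT k (tree.set (size + idx.toNat) (pvLeaf k val)) := by
    intro p
    rw [hTset p]
    split
    · exact pvVM_leaf k val
    · exact hV p
  have hG' : ∀ q, 1 ≤ q → q < size → (∀ j : Nat, ((size + idx.toNat)/2) / 2^j ≠ q) →
      pvT k (tree.set (size + idx.toNat) (pvLeaf k val)) q
      = pvMerge k (pvT k (tree.set (size + idx.toNat) (pvLeaf k val)) (2*q))
          (pvT k (tree.set (size + idx.toNat) (pvLeaf k val)) (2*q+1)) := by
    intro q hq1 hq2 hnanc
    have h0 := hnanc 0
    simp only [pow_zero, Nat.div_one] at h0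
    have hch1 : ¬(2*q = size + idx.toNat) := by omega
    have hch2 : ¬(2*q+1 = size + idx.toNat) := by
      intro h
      apply h0
      omega
    rw [hTset q, hTset (2*q), hTset (2*q+1), if_neg hch1, if_neg hch2, if_neg (by omega)]
    exact hG q hq1 hq2
  obtain ⟨a, b, c, d⟩ := pvUpdLoop_spec (size + idx.toNat + 1) ((size + idx.toNat)/2) _
    (by omega) (by omega) hlen' hV' hG'
  refine ⟨a, b, c, fun i => ?_⟩
  rw [show pvUpdate k size tree idx val = pvUpdLoop k (size + idx.toNat + 1)
      (tree.set (size + idx.toNat) (pvLeaf k val)) ((size + idx.toNat)/2) from rfl]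
  rw [d (size+i) (by omega), hTset (size+i), List.length_set]
  by_cases hi : i = idx.toNat
  · subst hi
    rw [if_pos rfl, if_pos hitn]
    congr 1
    rw [List.getD_eq_getElem?_getD, List.getElem?_set_self (by omega)]
    rfl
  · rw [if_neg (by omega), hleaf i]
    by_cases hilt : i < copy.length
    · rw [if_pos hilt, if_pos hilt]
      have hgd : (copy.set idx.toNat val).getD i 0 = copy.getD i 0 := by
        rw [List.getD_eq_getElem?_getD, List.getD_eq_getElem?_getD, List.getElem?_set_ne (by omega)]
      rw [hgd]
    · rw [if_neg hilt, if_neg hilt]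

theorem pvBuild_inv (k : Int) (nums : List Int) :
    pvInv k (pvSize nums.length)
      (pvBuildUp k (pvSize nums.length - 1)
        ((List.range nums.length).foldl
          (fun t i => t.set (pvSize nums.length + i) (pvLeaf k (nums.getD i 0)))
          (List.replicate (2 * pvSize nums.length) (pvE k)))) nums := by
  obtain ⟨hns, h1s⟩ := pvSize_ge nums.length
  obtain ⟨hlen, hint, hleaf⟩ := pvBuildLeaves_spec k (pvSize nums.length) nums hns nums.length le_rfl
  have hV0 : pvValidT k ((List.range nums.length).foldl
      (fun t i => t.set (pvSize nums.length + i) (pvLeaf k (nums.getD i 0)))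
      (List.replicate (2 * pvSize nums.length) (pvE k))) := by
    intro p
    by_cases hp : p < pvSize nums.length
    · rw [hint p hp]; exact pvVM_E k
    · have h := hleaf (p - pvSize nums.length)
      rw [show pvSize nums.length + (p - pvSize nums.length) = p from by omega] at h
      rw [h]
      split
      · exact pvVM_leaf k _
      · exact pvVM_E k
  obtain ⟨a, b, c, d⟩ := pvBuildUp_spec (pvSize nums.length - 1) _ (by omega) hlen hV0
    (fun p h1 h2 => by omega)
  exact ⟨a, b, c, fun i => by rw [d _ (by omega)]; exact hleaf i⟩

theorem pvLeaf_getD {k : Int} (hk : 0 < k) (v : Int) (r : Nat) :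
    (pvLeaf k v).1.getD r 0 = if r = (pvMod v k).toNat then 1 else 0 := by
  show ((List.replicate k.toNat (0:Int)).set (pvMod v k).toNat 1).getD r 0 = _
  rw [pvGetD_set _ _ _ _ (by rw [List.length_replicate]; exact pvMod_toNat_lt hk v)]
  split
  · rfl
  · exact pvGetD_replicate _ _

theorem pvScan {k : Int} (hk : 0 < k) (x : Int) (hx0 : 0 ≤ x) (hxk : x < k) :
    ∀ (vs : List Int) (a : pvM) (run cnt : Int), pvVM k a → pvMod a.2 k = pvMod run k →
      a.1.getD x.toNat 0 = cnt →
      ((vs.map (pvLeaf k)).foldl (pvMerge k) a).1.getD x.toNat 0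
        = (vs.foldl (fun (rc : Int × Int) v =>
            (pvMod (rc.1 * v) k, if pvMod (rc.1 * v) k = x then rc.2 + 1 else rc.2)) (run, cnt)).2 := by
  intro vs
  induction vs with
  | nil => intro a run cnt _ _ hcnt; simpa using hcnt
  | cons v t ih =>
    intro a run cnt hVa hrun hcnt
    rw [List.map_cons, List.foldl_cons, List.foldl_cons]
    have hprod : pvMod (a.2 * v) k = pvMod (run * v) k := by
      rw [← pvMod_mul_left hk a.2 v, hrun, pvMod_mul_left hk run v]
    refine ih (pvMerge k a (pvLeaf k v)) (pvMod (run * v) k) _ (pvVM_merge _ hVa) ?_ ?_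
    · rw [pvMerge_snd, pvMod_idem hk, pvMod_idem hk]
      show pvMod (a.2 * (pvMod v k)) k = pvMod (run * v) k
      rw [pvMod_mul_right hk, hprod]
    · have hxtn : x.toNat < k.toNat := by omega
      rw [pvMerge_getD hk a _ hVa x.toNat hxtn, hcnt]
      have hterm : ∀ r ∈ Finset.range k.toNat,
          (if (pvMod (a.2 * (r : Int)) k).toNat = x.toNat then (pvLeaf k v).1.getD r 0 else 0)
          = (if r = (pvMod v k).toNat then
              (if (pvMod (a.2 * (r : Int)) k).toNat = x.toNat then 1 else 0) else 0) := by
        intro r _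
        rw [pvLeaf_getD hk]
        split_ifs <;> rfl
      rw [Finset.sum_congr rfl hterm, Finset.sum_ite_eq',
        if_pos (Finset.mem_range.mpr (pvMod_toNat_lt hk v))]
      have hcond : pvMod (a.2 * ((pvMod v k).toNat : Int)) k = pvMod (run * v) k := by
        rw [pvMod_cast_toNat hk, pvMod_mul_right hk, hprod]
      rw [hcond]
      have hiff : ((pvMod (run * v) k).toNat = x.toNat) ↔ (pvMod (run * v) k = x) := by
        have := pvMod_nonneg hk (run * v)
        omega
      simp only [hiff]
      split <;> ring

theorem pvDropMap (copy : List Int) :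
    ∀ (n : Nat) (s : Nat), copy.length - s = n →
      (List.range' s (copy.length - s)).map (fun i => copy.getD i 0) = copy.drop s := by
  intro n
  induction n with
  | zero =>
    intro s hs
    rw [hs]
    rw [List.drop_eq_nil_of_le (by omega)]
    rfl
  | succ n ih =>
    intro s hs
    have hlt : s < copy.length := by omega
    rw [hs, List.range'_succ, List.map_cons, List.drop_eq_getElem_cons hlt]
    congr 1
    · exact List.getD_eq_getElem copy 0 hlt
    · rw [show n = copy.length - (s+1) from by omega]
      exact ih (s+1) (by omega)

theorem pvRowLeaves {k : Int} {size : Nat} {tree : List pvM} {copy : List Int}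
    (hleaf : ∀ i : Nat, pvT k tree (size+i) = if i < copy.length then pvLeaf k (copy.getD i 0) else pvE k)
    (hn : 1 ≤ copy.length) (hcs : copy.length ≤ size) (s : Nat) :
    pvRow k tree (size + s) (size + copy.length - 1) = (copy.drop s).map (pvLeaf k) := by
  have hcnt : (size + copy.length - 1) + 1 - (size + s) = copy.length - s := by omega
  rw [pvRow, hcnt]
  have hgen : ∀ (cnt s' : Nat), cnt + s' ≤ copy.length →
      (List.range' (size + s') cnt).map (pvT k tree)
      = (List.range' s' cnt).map (fun i => pvLeaf k (copy.getD i 0)) := by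
    intro cnt
    induction cnt with
    | zero => intro s' _; rfl
    | succ cnt ih =>
      intro s' hb
      rw [List.range'_succ, List.range'_succ, List.map_cons, List.map_cons]
      congr 1
      · rw [hleaf s', if_pos (by omega)]
      · have := ih (s'+1) (by omega)
        rw [show size + s' + 1 = size + (s'+1) from by omega]
        exact this
  by_cases hsle : s ≤ copy.length
  · rw [hgen (copy.length - s) s (by omega)]
    rw [show (List.range' s (copy.length - s)).map (fun i => pvLeaf k (copy.getD i 0))
        = ((List.range' s (copy.length - s)).map (fun i => copy.getD i 0)).map (pvLeaf k) from by
      rw [List.map_map]; rfl]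
    rw [pvDropMap copy (copy.length - s) s rfl]
  · rw [show copy.length - s = 0 from by omega, List.drop_eq_nil_of_le (by omega)]
    rfl

theorem pvQueries {k : Int} (hk : 0 < k) (n size : Nat) (hnsz : n ≤ size) (h1s : 1 ≤ size) :
    ∀ (qs : List (List Int)) (tree : List pvM) (copy : List Int) (res : List Int),
      pvInv k size tree copy → copy.length = n →
      (∀ q ∈ qs, 0 ≤ q.getD 0 0 ∧ q.getD 0 0 < (n : Int) ∧ 0 ≤ q.getD 2 0 ∧
        0 ≤ q.getD 3 0 ∧ q.getD 3 0 < k) →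
      (qs.foldl (fun (st : List pvM × List Int) q =>
          (pvUpdate k size st.1 (q.getD 0 0) (q.getD 1 0),
           st.2 ++ [(PySem.List.pyGet? (pvQ2 k (pvUpdate k size st.1 (q.getD 0 0) (q.getD 1 0))
              (size + n) (size + (q.getD 2 0).toNat) (size + n - 1) (pvE k) (pvE k)).1
              (q.getD 3 0)).getD 0])) (tree, res)).2
      = (qs.foldl (fun (st : List Int × List Int) q =>
          (st.1.set (q.getD 0 0).toNat (q.getD 1 0),
           st.2 ++ [((PySem.List.pyRange (q.getD 2 0) (n : Int) 1).foldl
              (fun (rc : Int × Int) j =>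
                (pvMod (rc.1 * ((st.1.set (q.getD 0 0).toNat (q.getD 1 0)).getD j.toNat 0)) k,
                 if pvMod (rc.1 * ((st.1.set (q.getD 0 0).toNat (q.getD 1 0)).getD j.toNat 0)) k
                     = q.getD 3 0 then rc.2 + 1 else rc.2))
              ((1 : Int), (0 : Int))).2])) (copy, res)).2 := by
  intro qs
  induction qs with
  | nil => intro tree copy res _ _ _; rfl
  | cons q qs ih =>
    intro tree copy res hinv hcl hall
    obtain ⟨hq0, hq0lt, hq2, hq3, hq3lt⟩ := hall q List.mem_cons_self
    have hn1 : 1 ≤ n := by omega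
    rw [List.foldl_cons, List.foldl_cons]
    have hinv' := pvUpdate_inv tree copy (q.getD 0 0) (q.getD 1 0) hinv (by omega) hq0
      (by rw [hcl]; exact hq0lt)
    have hcl' : (copy.set (q.getD 0 0).toNat (q.getD 1 0)).length = n := by
      rw [List.length_set]; exact hcl
    obtain ⟨hlen', hV', hG', hleaf'⟩ := hinv'
    have hinv'' : pvInv k size (pvUpdate k size tree (q.getD 0 0) (q.getD 1 0))
        (copy.set (q.getD 0 0).toNat (q.getD 1 0)) := ⟨hlen', hV', hG', hleaf'⟩
    have hq2spec := pvQ2_spec hk hG' hV' (size + n) (size + (q.getD 2 0).toNat)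
      (size + n - 1) (pvE k) (pvE k) (by omega) (by omega) (by omega) (pvVM_E k) (pvVM_E k)
    have hcount : (pvQ2 k (pvUpdate k size tree (q.getD 0 0) (q.getD 1 0)) (size + n)
          (size + (q.getD 2 0).toNat) (size + n - 1) (pvE k) (pvE k)).1
        = (pvFold k (pvRow k (pvUpdate k size tree (q.getD 0 0) (q.getD 1 0))
            (size + (q.getD 2 0).toNat) (size + n - 1))).1 := by
      rw [hq2spec.1, pvMerge_e_right, pvMerge_e_left hk _ (pvVM_fold _)]
    have hrow : pvRow k (pvUpdate k size tree (q.getD 0 0) (q.getD 1 0))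
        (size + (q.getD 2 0).toNat) (size + n - 1)
        = ((copy.set (q.getD 0 0).toNat (q.getD 1 0)).drop (q.getD 2 0).toNat).map (pvLeaf k) := by
      have := pvRowLeaves hleaf' (by omega) (by omega) (q.getD 2 0).toNat
      rw [hcl'] at this
      exact this
    have hscan := pvScan hk (q.getD 3 0) hq3 hq3lt
      ((copy.set (q.getD 0 0).toNat (q.getD 1 0)).drop (q.getD 2 0).toNat)
      (pvE k) 1 0 (pvVM_E k) rfl (pvGetD_replicate _ _)
    have hlenF : (pvFold k (pvRow k (pvUpdate k size tree (q.getD 0 0) (q.getD 1 0))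
        (size + (q.getD 2 0).toNat) (size + n - 1))).1.length = k.toNat := pvVM_fold _
    have hxtn : (q.getD 3 0).toNat < k.toNat := by omega
    have hA : (PySem.List.pyGet? (pvQ2 k (pvUpdate k size tree (q.getD 0 0) (q.getD 1 0))
          (size + n) (size + (q.getD 2 0).toNat) (size + n - 1) (pvE k) (pvE k)).1
          (q.getD 3 0)).getD 0
        = (((copy.set (q.getD 0 0).toNat (q.getD 1 0)).drop (q.getD 2 0).toNat).foldl
            (fun (rc : Int × Int) v =>
              (pvMod (rc.1 * v) k, if pvMod (rc.1 * v) k = q.getD 3 0 then rc.2 + 1 else rc.2))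
            ((1 : Int), (0 : Int))).2 := by
      rw [PySem.List.pyGet?_of_nonneg _ hq3, hcount, hrow]
      rw [← hscan]
      rw [List.getD_eq_getElem?_getD]
      rfl
    have hB : ((PySem.List.pyRange (q.getD 2 0) (n : Int) 1).foldl
          (fun (rc : Int × Int) j =>
            (pvMod (rc.1 * ((copy.set (q.getD 0 0).toNat (q.getD 1 0)).getD j.toNat 0)) k,
             if pvMod (rc.1 * ((copy.set (q.getD 0 0).toNat (q.getD 1 0)).getD j.toNat 0)) k
                 = q.getD 3 0 then rc.2 + 1 else rc.2))
          ((1 : Int), (0 : Int)))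
        = (((copy.set (q.getD 0 0).toNat (q.getD 1 0)).drop (q.getD 2 0).toNat).foldl
            (fun (rc : Int × Int) v =>
              (pvMod (rc.1 * v) k, if pvMod (rc.1 * v) k = q.getD 3 0 then rc.2 + 1 else rc.2))
            ((1 : Int), (0 : Int))) := by
      have hcongr : ∀ (acc : Int × Int) (j : Int), j ∈ PySem.List.pyRange (q.getD 2 0) (n : Int) 1 →
          (pvMod (acc.1 * ((copy.set (q.getD 0 0).toNat (q.getD 1 0)).getD j.toNat 0)) k,
           if pvMod (acc.1 * ((copy.set (q.getD 0 0).toNat (q.getD 1 0)).getD j.toNat 0)) k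
               = q.getD 3 0 then acc.2 + 1 else acc.2)
          = ((fun (rc : Int × Int) (v : Int) =>
              (pvMod (rc.1 * v) k, if pvMod (rc.1 * v) k = q.getD 3 0 then rc.2 + 1 else rc.2)) acc
              (PySem.List.pyGetD (copy.set (q.getD 0 0).toNat (q.getD 1 0)) j 0)) := by
        intro acc j hj
        obtain ⟨hjl, hjr⟩ := (PySem.List.mem_pyRange_one).mp hj
        have hj0 : 0 ≤ j := by omega
        have hjlen : j < ((copy.set (q.getD 0 0).toNat (q.getD 1 0)).length : Int) := by
          rw [hcl']; exact hjr
        rw [PySem.List.pyGetD_eq_getElem _ 0 hj0 hjlen]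
        have hgd : (copy.set (q.getD 0 0).toNat (q.getD 1 0)).getD j.toNat 0
            = (copy.set (q.getD 0 0).toNat (q.getD 1 0))[j.toNat]'(by omega) :=
          List.getD_eq_getElem _ 0 (by omega)
        rw [hgd]
      rw [PySem.List.foldl_congr_mem _ _ _ _ hcongr]
      rw [show ((n : Int)) = ((copy.set (q.getD 0 0).toNat (q.getD 1 0)).length : Int) from by rw [hcl']]
      exact PySem.List.foldl_pyRange_pyGetD' (copy.set (q.getD 0 0).toNat (q.getD 1 0)) 0
        (fun rc v => (pvMod (rc.1 * v) k, if pvMod (rc.1 * v) k = q.getD 3 0 then rc.2 + 1 else rc.2))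
        ((1 : Int), (0 : Int)) hq2
    rw [hA, ← hB]
    exact ih _ _ _ hinv'' hcl' (fun q' hq' => hall q' (List.mem_cons_of_mem _ hq'))
-- ===== VERDICT (by name: the statement is the Claim_ definition above) =====
theorem resultArray_spec : Claim_equal_resultArray := by
  unfold Claim_equal_resultArray
  intro nums k queries hdom hpre
  show resultArray nums k queries = resultArray_alt nums k queries
  obtain ⟨hk1, hq⟩ := hpre
  rcases hk1 with hk1 | ⟨hne, hqe⟩
  swap
  · subst hne; subst hqe; rfl
  have hk : 0 < k := by omega
  obtain ⟨hns, h1s⟩ := pvSize_ge nums.length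
  exact pvQueries hk nums.length (pvSize nums.length) hns h1s queries _ nums []
    (pvBuild_inv k nums) rfl
    (fun q hqm => ⟨(hq q hqm).2.1, (hq q hqm).2.2.1, (hq q hqm).2.2.2.1,
      (hq q hqm).2.2.2.2.1, (hq q hqm).2.2.2.2.2⟩)
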